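-- pv_equiv track=rewrite | github.com/bbtanmanai/main | packages/tools/skill-2-video-longform1/opal-manager/logic.py | _split_hook_lines
-- ===== SOURCE A (Python) =====
-- def _split_hook_lines(text: str, max_len: int = 14) -> list[str]:
--     """
--     hook 텍스트를 2줄로 분할.
--     max_len 이하이면 1줄. 초과 시 공백/구두점 기준으로 분할.
--     """
--     if len(text) <= max_len:
--         return [text]
--     # 중간 앞뒤 공백·쉼표·마침표 탐색
--     mid = len(text) // 2
--     for offset in range(0, mid):
--         for pos in [mid - offset, mid + offset]:
--             if pos <= 0 or pos >= len(text):
--                 continue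
--             if text[pos] in (" ", ",", ".", "·", "!", "?"):
--                 return [text[:pos].strip(), text[pos:].strip().lstrip(",. ")]
--     # 공백 없으면 그냥 반반
--     return [text[:mid].strip(), text[mid:].strip()]
-- ===== SOURCE B (Python) =====
-- def _split_hook_lines(text: str, max_len: int = 14) -> list[str]:
--     if len(text) <= max_len:
--         return [text]
--     mid = len(text) // 2
--     cands = [p for p in range(1, min(2 * mid, len(text)))
--              if text[p] in (" ", ",", ".", "·", "!", "?")]
--     if cands:
--         p = min(cands, key=lambda q: (abs(q - mid), q))
--         return [text[:p].strip(), text[p:].strip().lstrip(",. ")]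
--     return [text[:mid].strip(), text[mid:].strip()]
-- ===== Notes on version B (the rewrite author's own statement) =====
-- stated objective: alternative
-- what changed: Replaces A's expanding two-sided early-return scan (offset 0..mid-1, probing mid-offset then mid+offset) with a single pass that collects all break positions in range(1, min(2*mid, len(text))) and picks the one minimizing the key (abs(p-mid), p).
import Mathlib
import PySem

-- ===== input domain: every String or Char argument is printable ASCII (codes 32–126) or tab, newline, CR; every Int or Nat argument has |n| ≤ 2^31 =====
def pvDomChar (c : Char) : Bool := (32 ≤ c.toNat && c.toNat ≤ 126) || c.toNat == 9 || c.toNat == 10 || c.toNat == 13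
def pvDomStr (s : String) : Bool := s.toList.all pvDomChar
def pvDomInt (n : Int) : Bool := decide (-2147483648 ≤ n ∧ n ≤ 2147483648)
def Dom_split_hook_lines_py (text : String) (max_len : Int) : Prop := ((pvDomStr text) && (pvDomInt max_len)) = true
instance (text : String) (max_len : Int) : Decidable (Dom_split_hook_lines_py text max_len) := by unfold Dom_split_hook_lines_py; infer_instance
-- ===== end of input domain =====

-- B replaces A's expanding two-sided early-return scan around the midpoint by one pass collecting all
-- break positions and an argmin by the key (abs(p-mid), p); same results, no speed claim (objective: alternative).

-- shared transliterations of the very same Python sub-expressions appearing in A and in B: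
-- `text[p] in (" ", ",", ".", "·", "!", "?")`
def pvBrk (c : Char) : Bool :=
  c == ' ' || c == ',' || c == '.' || c == '·' || c == '!' || c == '?'

def pvHit (cs : List Char) (p : Int) : Bool :=
  match PySem.List.pyGet? cs p with
  | some c => pvBrk c
  | none => false

-- `.lstrip(",. ")` — hand port (exact: str.lstrip(chars) drops leading chars belonging to the set)
def pvLstripPunct (cs : List Char) : List Char :=
  cs.dropWhile (fun c => c == ',' || c == '.' || c == ' ')

-- ===== PORT A =====
-- `for offset in range(0, mid): for pos in [mid-offset, mid+offset]: …` with early return;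
-- fuel = number of remaining offsets, off = current offset
def pvLoopA (cs : List Char) (mid : Int) : Nat → Int → Option Int
  | 0, _ => none
  | fuel + 1, off =>
    if (0 < mid - off ∧ mid - off < (cs.length : Int)) ∧ pvHit cs (mid - off) = true then
      some (mid - off)
    else if (0 < mid + off ∧ mid + off < (cs.length : Int)) ∧ pvHit cs (mid + off) = true then
      some (mid + off)
    else pvLoopA cs mid fuel (off + 1)

def split_hook_lines_py (text : String) (max_len : Int) : List String :=
  let cs := text.toList
  if (cs.length : Int) ≤ max_len then [text]
  else
    let mid : Int := PySem.Int.floordiv (cs.length : Int) 2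
    match pvLoopA cs mid mid.toNat 0 with
    | some pos =>
      [String.ofList (PySem.Chars.strip (PySem.List.slice cs none (some pos))),
       String.ofList (pvLstripPunct (PySem.Chars.strip (PySem.List.slice cs (some pos) none)))]
    | none =>
      [String.ofList (PySem.Chars.strip (PySem.List.slice cs none (some mid))),
       String.ofList (PySem.Chars.strip (PySem.List.slice cs (some mid) none))]

-- ===== PORT B =====
-- `[p for p in range(1, min(2*mid, len(text))) if text[p] in (…)]`
def pvCands (cs : List Char) (mid : Int) : List Int :=
  (PySem.List.pyRange 1 (min (2 * mid) (cs.length : Int)) 1).filter (fun p => pvHit cs p)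

def split_hook_lines_py_alt (text : String) (max_len : Int) : List String :=
  let cs := text.toList
  if (cs.length : Int) ≤ max_len then [text]
  else
    let mid : Int := PySem.Int.floordiv (cs.length : Int) 2
    -- `if cands: p = min(cands, key=lambda q: (abs(q-mid), q))` — min2? is none exactly when cands is empty
    match PySem.List.min2? (pvCands cs mid) (fun q => |q - mid|) (fun q => q) with
    | some p =>
      [String.ofList (PySem.Chars.strip (PySem.List.slice cs none (some p))),
       String.ofList (pvLstripPunct (PySem.Chars.strip (PySem.List.slice cs (some p) none)))]
    | none =>
      [String.ofList (PySem.Chars.strip (PySem.List.slice cs none (some mid))),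
       String.ofList (PySem.Chars.strip (PySem.List.slice cs (some mid) none))]

-- ===== PRECONDITION & SPEC =====
def Spec_split_hook_lines_py (text : String) (max_len : Int) (out : List String) : Prop := out = split_hook_lines_py_alt text max_len
instance (text : String) (max_len : Int) (out : List String) : Decidable (Spec_split_hook_lines_py text max_len out) := by unfold Spec_split_hook_lines_py; infer_instance

-- ===== CLAIM (what is proved, stated in full; the proofs are below) =====
def Claim_equal_split_hook_lines_py : Prop := ∀ (text : String) (max_len : Int), Dom_split_hook_lines_py text max_len → Spec_split_hook_lines_py text max_len (split_hook_lines_py text max_len)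

-- ===== LEMMAS AND PROOFS =====

-- strict lexicographic order on the key (|q - mid|, q) used by B
def pvKlt (mid x y : Int) : Prop :=
  (x - mid).natAbs < (y - mid).natAbs ∨ ((x - mid).natAbs = (y - mid).natAbs ∧ x < y)

lemma pv_fold_min_aux (mid x : Int) :
    ∀ (xs : List Int) (acc : Option Int),
      (x ∈ xs ∨ acc = some x) →
      (∀ y ∈ xs, y = x ∨ pvKlt mid x y) →
      (∀ y, acc = some y → y = x ∨ pvKlt mid x y) →
      xs.foldl (fun acc z => match acc with
        | none => some z
        | some m =>
          if (decide (|z - mid| < |m - mid|) || (!decide (|m - mid| < |z - mid|) && decide (z < m))) = true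
          then some z else some m) acc = some x := by
  intro xs
  induction xs with
  | nil =>
    intro acc hx _ _
    rcases hx with hx | hx
    · exact absurd hx (List.not_mem_nil)
    · simpa using hx
  | cons z zs ih =>
    intro acc hx hall hacc
    rcases acc with _ | m
    · simp only [List.foldl_cons]
      apply ih
      · rcases hx with hx | hx
        · rcases List.mem_cons.mp hx with h | h
          · right; rw [h]
          · left; exact h
        · exact absurd hx (by simp)
      · intro y hy; exact hall y (List.mem_cons_of_mem _ hy)
      · intro y hy
        have hyz : y = z := by simpa using hy.symm
        subst hyz
        exact hall y (List.mem_cons_self)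
    · simp only [List.foldl_cons]
      by_cases hcond : (decide (|z - mid| < |m - mid|) || (!decide (|m - mid| < |z - mid|) && decide (z < m))) = true
      · rw [if_pos hcond]
        apply ih
        · rcases hx with hx | hx
          · rcases List.mem_cons.mp hx with h | h
            · right; rw [h]
            · left; exact h
          · -- acc carried x (m = x); then z = x, or pvKlt x z contradicting hcond
            have hm : m = x := by simpa using hx
            rcases hall z (List.mem_cons_self) with h | h
            · right; rw [h]
            · exfalso
              subst hm
              simp only [Bool.or_eq_true, Bool.and_eq_true, Bool.not_eq_true',
                decide_eq_true_eq, decide_eq_false_iff_not, Int.abs_eq_natAbs] at hcond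
              unfold pvKlt at h
              omega
        · intro y hy; exact hall y (List.mem_cons_of_mem _ hy)
        · intro y hy
          have hyz : y = z := by simpa using hy.symm
          subst hyz
          exact hall y (List.mem_cons_self)
      · rw [if_neg hcond]
        apply ih
        · rcases hx with hx | hx
          · rcases List.mem_cons.mp hx with h | h
            · -- x = z; then m = x, or pvKlt x m forcing hcond true
              by_cases hm : m = x
              · right; rw [hm]
              · exfalso
                rcases hacc m rfl with h2 | h2
                · exact hm h2
                · apply hcond
                  subst h
                  simp only [Bool.or_eq_true, Bool.and_eq_true, Bool.not_eq_true',
                    decide_eq_true_eq, decide_eq_false_iff_not, Int.abs_eq_natAbs]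
                  unfold pvKlt at h2
                  omega
            · left; exact h
          · right; exact hx
        · intro y hy; exact hall y (List.mem_cons_of_mem _ hy)
        · intro y hy
          have hym : y = m := by simpa using hy.symm
          subst hym
          exact hacc y rfl

lemma pv_min2?_eq_unique (mid x : Int) (xs : List Int)
    (hx : x ∈ xs) (hbeat : ∀ y ∈ xs, y = x ∨ pvKlt mid x y) :
    PySem.List.min2? xs (fun q => |q - mid|) (fun q => q) = some x := by
  have h := pv_fold_min_aux mid x xs none (Or.inl hx) hbeat
    (fun y hy => absurd hy (by simp))
  unfold PySem.List.min2?
  convert h using 2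
  funext acc z
  rcases acc with _ | m <;> rfl

lemma pv_mem_cands {cs : List Char} {mid p : Int} :
    p ∈ pvCands cs mid ↔ (1 ≤ p ∧ p < 2 * mid ∧ p < (cs.length : Int)) ∧ pvHit cs p = true := by
  simp [pvCands, List.mem_filter, PySem.List.mem_pyRange_one, and_assoc]

lemma pvLoopA_eq (cs : List Char) (mid : Int) :
    ∀ (fuel : Nat) (off : Int), 0 ≤ off → off + fuel = mid →
      (∀ p ∈ pvCands cs mid, off ≤ |p - mid|) →
      pvLoopA cs mid fuel off
        = PySem.List.min2? (pvCands cs mid) (fun q => |q - mid|) (fun q => q) := by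
  intro fuel
  induction fuel with
  | zero =>
    intro off hoff hsum hinv
    have hC : pvCands cs mid = [] := by
      rw [List.eq_nil_iff_forall_not_mem]
      intro p hp
      have h1 := pv_mem_cands.mp hp
      have h2 := hinv p hp
      rw [Int.abs_eq_natAbs] at h2
      omega
    rw [hC]
    rfl
  | succ fuel ih =>
    intro off hoff hsum hinv
    have hmid1 : 1 ≤ mid := by omega
    rw [pvLoopA]
    split_ifs with h1 h2
    · -- found at mid - off
      refine (pv_min2?_eq_unique mid (mid - off) _ ?_ ?_).symm
      · exact pv_mem_cands.mpr ⟨⟨by omega, by omega, by omega⟩, h1.2⟩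
      · intro y hy
        have hinvy := hinv y hy
        rw [Int.abs_eq_natAbs] at hinvy
        unfold pvKlt
        omega
    · -- found at mid + off
      refine (pv_min2?_eq_unique mid (mid + off) _ ?_ ?_).symm
      · exact pv_mem_cands.mpr ⟨⟨by omega, by omega, h2.1.2⟩, h2.2⟩
      · intro y hy
        have hinvy := hinv y hy
        rw [Int.abs_eq_natAbs] at hinvy
        have hmy := pv_mem_cands.mp hy
        unfold pvKlt
        -- y ≠ mid - off: otherwise branch h1 would have fired
        by_cases hyl : y = mid - off
        · exfalso; apply h1; subst hyl; exact ⟨⟨by omega, hmy.1.2.2⟩, hmy.2⟩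
        · omega
    · -- nothing at distance off: recurse with off + 1
      apply ih (off + 1) (by omega) (by omega)
      intro p hp
      have hinvp := hinv p hp
      have hmp := pv_mem_cands.mp hp
      rw [Int.abs_eq_natAbs] at hinvp ⊢
      by_cases hpl : p = mid - off
      · exfalso; apply h1; subst hpl; exact ⟨⟨by omega, hmp.1.2.2⟩, hmp.2⟩
      · by_cases hpr : p = mid + off
        · exfalso; apply h2; subst hpr; exact ⟨⟨by omega, hmp.1.2.2⟩, hmp.2⟩
        · omega

-- ===== VERDICT (by name: the statement is the Claim_ definition above) =====
theorem split_hook_lines_py_spec : Claim_equal_split_hook_lines_py := by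
  intro text max_len _
  unfold Spec_split_hook_lines_py split_hook_lines_py split_hook_lines_py_alt
  by_cases hc : ((text.toList.length : Int) ≤ max_len)
  · simp only [if_pos hc]
  · simp only [if_neg hc]
    have hmid0 : 0 ≤ PySem.Int.floordiv (text.toList.length : Int) 2 := by
      rw [PySem.Int.floordiv_eq_ediv_of_pos (by omega)]
      exact Int.ediv_nonneg (by positivity) (by omega)
    rw [pvLoopA_eq text.toList _ _ 0 le_rfl (by omega)
      (fun p _ => abs_nonneg _)]
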